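-- pv_equiv track=rewrite | github.com/zfsopv/sex_support_web | docs/get_docs/se9/merge_rst.py | parse_toctree_blocks_from_index
-- ===== SOURCE A (Python) =====
-- def parse_toctree_blocks_from_index(content):
--     """
--     解析 index.rst 中所有 .. toctree:: 块（按出现顺序）。
--     返回 [(has_glob, [docname, ...]), ...]，docname 已去掉 .rst 后缀。
--     """
--     lines = content.splitlines()
--     blocks = []
--     i = 0
--     n = len(lines)
--     while i < n:
--         if lines[i].strip() != '.. toctree::':
--             i += 1
--             continue
--         has_glob = False
--         entries = []
--         i += 1
--         while i < n:
--             s = lines[i]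
--             st = s.strip()
--             if st == '':
--                 i += 1
--                 continue
--             if st.startswith(':'):
--                 if ':glob:' in st:
--                     has_glob = True
--                 i += 1
--                 continue
--             break
--         while i < n:
--             s = lines[i]
--             st = s.strip()
--             if st == '':
--                 i += 1
--                 continue
--             if not s or not s[0].isspace():
--                 break
--             if st.startswith('..'):
--                 break
--             docname = st.split('#')[0].strip()
--             if docname.endswith('.rst'):
--                 docname = docname[:-4]
--             entries.append(docname)
--             i += 1
--         blocks.append((has_glob, entries))
--     return blocks
-- ===== SOURCE B (Python) =====
-- def _parse_block(tail):
--     """Parse one toctree block from the lines following its header."""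
--     j = 0
--     while j < len(tail):
--         st = tail[j].strip()
--         if st != '' and not st.startswith(':'):
--             break
--         j += 1
--     has_glob = any(':glob:' in t.strip() for t in tail[:j]
--                    if t.strip().startswith(':'))
--     body = []
--     for s in tail[j:]:
--         st = s.strip()
--         if st == '':
--             continue
--         if not s[0].isspace() or st.startswith('..'):
--             break
--         body.append(st)
--     entries = [d[:-4] if d.endswith('.rst') else d
--                for d in (st.split('#')[0].strip() for st in body)]
--     return (has_glob, entries)
--
--
-- def parse_toctree_blocks_from_index(content):
--     """Two-phase: locate every '.. toctree::' header line, then parse each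
--     block independently from the lines that follow its header (a block can
--     never run past the next header, so the blocks are independent)."""
--     lines = content.splitlines()
--     return [_parse_block(lines[i + 1:])
--             for i, ln in enumerate(lines) if ln.strip() == '.. toctree::']
-- ===== Notes on version B (the rewrite author's own statement) =====
-- stated objective: alternative
-- what changed: A threads a single resumable cursor through nested while-loops; B first locates every '.. toctree::' header line and then parses each block independently from the lines following its header (correct because a block's option/entry scans can never consume a header line), with has_glob computed by any() over the option slice and entries by a comprehension over the collected body.
import Mathlib
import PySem

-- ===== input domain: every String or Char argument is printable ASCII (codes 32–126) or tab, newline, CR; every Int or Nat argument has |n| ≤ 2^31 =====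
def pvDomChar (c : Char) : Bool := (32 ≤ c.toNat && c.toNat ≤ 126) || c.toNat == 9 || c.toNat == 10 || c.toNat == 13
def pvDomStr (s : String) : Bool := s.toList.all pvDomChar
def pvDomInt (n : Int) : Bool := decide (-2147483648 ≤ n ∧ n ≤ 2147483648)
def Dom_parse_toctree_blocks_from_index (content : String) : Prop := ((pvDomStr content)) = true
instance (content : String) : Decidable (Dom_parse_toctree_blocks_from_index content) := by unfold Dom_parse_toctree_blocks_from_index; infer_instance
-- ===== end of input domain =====

-- B locates all header lines first and parses each block independently from its header's tail, instead of A's resumable cursor with nested loops (objective: alternative decomposition, same cost on typical input).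

-- shared line-level helpers (the same Python expressions appear verbatim in both programs)
-- 's and s[0].isspace()' — true iff the line is non-empty and starts with whitespace
def pvIndented (s : String) : Bool :=
  match s.toList with
  | [] => false
  | c :: _ => PySem.Chars.isspace c

-- docname = st.split('#')[0].strip(); if docname.endswith('.rst'): docname = docname[:-4]
def pvDocname (st : String) : String :=
  let d := PySem.Str.strip (((PySem.Str.split? st "#").getD []).headD "")
  if PySem.Str.endswith d ".rst" then PySem.Str.slice d none (some (-4)) else d

-- ===== PORT A =====
-- inner options while-loop: returns (has_glob, remaining lines)
def pvA_options : List String → Bool → (Bool × List String)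
  | [], hg => (hg, [])
  | s :: rest, hg =>
    let st := PySem.Str.strip s
    if st = "" then pvA_options rest hg
    else if PySem.Str.startswith st ":" then
      pvA_options rest (if PySem.Str.isIn ":glob:" st then true else hg)
    else (hg, s :: rest)

-- inner entries while-loop: returns (finished block, remaining lines)
def pvA_entries : List String → Bool → List String → ((Bool × List String) × List String)
  | [], hg, es => ((hg, es), [])
  | s :: rest, hg, es =>
    let st := PySem.Str.strip s
    if st = "" then pvA_entries rest hg es
    else if ¬ pvIndented s = true then ((hg, es), s :: rest)
    else if PySem.Str.startswith st ".." then ((hg, es), s :: rest)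
    else pvA_entries rest hg (es ++ [pvDocname st])

theorem pvA_options_length : ∀ (ls : List String) (hg : Bool),
    (pvA_options ls hg).2.length ≤ ls.length := by
  intro ls
  induction ls with
  | nil => intro hg; simp [pvA_options]
  | cons s rest ih =>
    intro hg
    by_cases h1 : PySem.Str.strip s = ""
    · rw [show pvA_options (s :: rest) hg = pvA_options rest hg from by simp only [pvA_options]; rw [if_pos h1]]
      exact Nat.le_succ_of_le (ih hg)
    · by_cases h2 : PySem.Str.startswith (PySem.Str.strip s) ":" = true
      · rw [show pvA_options (s :: rest) hg
            = pvA_options rest (if PySem.Str.isIn ":glob:" (PySem.Str.strip s) then true else hg) from by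
          simp only [pvA_options]; rw [if_neg h1, if_pos h2]]
        exact Nat.le_succ_of_le (ih _)
      · rw [show pvA_options (s :: rest) hg = (hg, s :: rest) from by simp only [pvA_options]; rw [if_neg h1, if_neg h2]]

theorem pvA_entries_length : ∀ (ls : List String) (hg : Bool) (es : List String),
    (pvA_entries ls hg es).2.length ≤ ls.length := by
  intro ls
  induction ls with
  | nil => intro hg es; simp [pvA_entries]
  | cons s rest ih =>
    intro hg es
    by_cases h1 : PySem.Str.strip s = ""
    · rw [show pvA_entries (s :: rest) hg es = pvA_entries rest hg es from by simp only [pvA_entries]; rw [if_pos h1]]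
      exact Nat.le_succ_of_le (ih hg es)
    · by_cases hI : pvIndented s = true
      · by_cases h3 : PySem.Str.startswith (PySem.Str.strip s) ".." = true
        · rw [show pvA_entries (s :: rest) hg es = ((hg, es), s :: rest) from by
            simp only [pvA_entries]; rw [if_neg h1, if_neg (not_not_intro hI), if_pos h3]]
        · rw [show pvA_entries (s :: rest) hg es
              = pvA_entries rest hg (es ++ [pvDocname (PySem.Str.strip s)]) from by
            simp only [pvA_entries]; rw [if_neg h1, if_neg (not_not_intro hI), if_neg h3]]
          exact Nat.le_succ_of_le (ih hg _)
      · rw [show pvA_entries (s :: rest) hg es = ((hg, es), s :: rest) from by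
          simp only [pvA_entries]; rw [if_neg h1, if_pos hI]]

-- outer while-loop of A
def pvA_main : List String → List (Bool × List String) → List (Bool × List String)
  | [], blocks => blocks
  | s :: rest, blocks =>
    if PySem.Str.strip s ≠ ".. toctree::" then pvA_main rest blocks
    else
      let o := pvA_options rest false
      let e := pvA_entries o.2 o.1 []
      pvA_main e.2 (blocks ++ [e.1])
termination_by ls _ => ls.length
decreasing_by
  · simp
  · have h1 := pvA_options_length rest false
    have h2 := pvA_entries_length (pvA_options rest false).2 (pvA_options rest false).1 []
    simp only [List.length_cons]
    omega

def parse_toctree_blocks_from_index (content : String) : List (Bool × List String) :=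
  pvA_main (PySem.Str.splitlines content) []

-- ===== PORT B =====
-- while j < len(tail): … break/j += 1  — j = length of the blank-or-':' prefix
def pvB_skip : List String → Nat
  | [] => 0
  | s :: rest =>
    let st := PySem.Str.strip s
    if st ≠ "" ∧ ¬ PySem.Str.startswith st ":" = true then 0 else pvB_skip rest + 1

-- any(':glob:' in t.strip() for t in tail[:j] if t.strip().startswith(':'))
def pvGlobPred (t : String) : Bool :=
  PySem.Str.startswith (PySem.Str.strip t) ":" && PySem.Str.isIn ":glob:" (PySem.Str.strip t)

-- 'for s in tail[j:]: …' collecting the stripped entry lines until the break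
def pvB_body : List String → List String
  | [] => []
  | s :: rest =>
    let st := PySem.Str.strip s
    if st = "" then pvB_body rest
    else if (¬ pvIndented s = true) ∨ PySem.Str.startswith st ".." = true then []
    else st :: pvB_body rest

-- _parse_block(tail)
def pvB_block (tail : List String) : Bool × List String :=
  let j := pvB_skip tail
  let hg := (tail.take j).any pvGlobPred
  (hg, (pvB_body (tail.drop j)).map pvDocname)

-- the comprehension: for each header line, parse the tail that follows it
def pvB_main : List String → List (Bool × List String)
  | [] => []
  | s :: rest =>
    if PySem.Str.strip s = ".. toctree::" then pvB_block rest :: pvB_main rest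
    else pvB_main rest

def parse_toctree_blocks_from_index_alt (content : String) : List (Bool × List String) :=
  pvB_main (PySem.Str.splitlines content)

-- ===== PRECONDITION & SPEC =====
def Spec_parse_toctree_blocks_from_index (content : String) (out : List (Bool × List String)) : Prop := out = parse_toctree_blocks_from_index_alt content
instance (content : String) (out : List (Bool × List String)) : Decidable (Spec_parse_toctree_blocks_from_index content out) := by unfold Spec_parse_toctree_blocks_from_index; infer_instance

-- ===== CLAIM (what is proved, stated in full; the proofs are below) =====
def Claim_equal_parse_toctree_blocks_from_index : Prop := ∀ (content : String), Dom_parse_toctree_blocks_from_index content → Spec_parse_toctree_blocks_from_index content (parse_toctree_blocks_from_index content)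

-- ===== LEMMAS AND PROOFS =====

-- A's options loop = B's skip count: glob flag over the consumed slice, remainder is the drop
theorem pvA_options_eq : ∀ (ls : List String) (hg : Bool),
    pvA_options ls hg = (hg || (ls.take (pvB_skip ls)).any pvGlobPred, ls.drop (pvB_skip ls)) := by
  intro ls
  induction ls with
  | nil => intro hg; simp [pvA_options, pvB_skip]
  | cons s rest ih =>
    intro hg
    by_cases h1 : PySem.Str.strip s = ""
    · have hs : pvB_skip (s :: rest) = pvB_skip rest + 1 := by
        simp only [pvB_skip]; rw [if_neg (by simp [h1])]
      have hp : pvGlobPred s = false := by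
        simp [pvGlobPred, h1]
        intro h; exact absurd h (by decide)
      rw [show pvA_options (s :: rest) hg = pvA_options rest hg from by
        simp only [pvA_options]; rw [if_pos h1]]
      rw [ih hg, hs]
      simp [hp]
    · by_cases h2 : PySem.Str.startswith (PySem.Str.strip s) ":" = true
      · have hs : pvB_skip (s :: rest) = pvB_skip rest + 1 := by
          simp only [pvB_skip]; rw [if_neg (fun hc => hc.2 h2)]
        rw [show pvA_options (s :: rest) hg
            = pvA_options rest (if PySem.Str.isIn ":glob:" (PySem.Str.strip s) then true else hg) from by
          simp only [pvA_options]; rw [if_neg h1, if_pos h2]]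
        rw [ih _, hs]
        have hp : pvGlobPred s = PySem.Str.isIn ":glob:" (PySem.Str.strip s) := by
          simp only [pvGlobPred, h2, Bool.true_and]
        simp only [List.take_succ_cons, List.drop_succ_cons, List.any_cons, hp]
        cases hg <;> cases hgi : PySem.Str.isIn ":glob:" (PySem.Str.strip s) <;> simp
      · have hs : pvB_skip (s :: rest) = 0 := by
          simp only [pvB_skip]; rw [if_pos ⟨h1, h2⟩]
        rw [show pvA_options (s :: rest) hg = (hg, s :: rest) from by
          simp only [pvA_options]; rw [if_neg h1, if_neg h2]]
        rw [hs]; simp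

-- A's entries loop returns the block B builds (accumulator written out)
theorem pvA_entries_fst : ∀ (ls : List String) (hg : Bool) (es : List String),
    (pvA_entries ls hg es).1 = (hg, es ++ (pvB_body ls).map pvDocname) := by
  intro ls
  induction ls with
  | nil => intro hg es; simp [pvA_entries, pvB_body]
  | cons s rest ih =>
    intro hg es
    by_cases h1 : PySem.Str.strip s = ""
    · rw [show pvA_entries (s :: rest) hg es = pvA_entries rest hg es from by
        simp only [pvA_entries]; rw [if_pos h1]]
      rw [ih]
      rw [show pvB_body (s :: rest) = pvB_body rest from by
        simp only [pvB_body]; rw [if_pos h1]]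
    · by_cases hI : pvIndented s = true
      · by_cases h3 : PySem.Str.startswith (PySem.Str.strip s) ".." = true
        · rw [show pvA_entries (s :: rest) hg es = ((hg, es), s :: rest) from by
            simp only [pvA_entries]; rw [if_neg h1, if_neg (not_not_intro hI), if_pos h3]]
          rw [show pvB_body (s :: rest) = [] from by
            simp only [pvB_body]; rw [if_neg h1, if_pos (Or.inr h3)]]
          simp
        · rw [show pvA_entries (s :: rest) hg es
              = pvA_entries rest hg (es ++ [pvDocname (PySem.Str.strip s)]) from by
            simp only [pvA_entries]; rw [if_neg h1, if_neg (not_not_intro hI), if_neg h3]]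
          rw [ih]
          rw [show pvB_body (s :: rest) = PySem.Str.strip s :: pvB_body rest from by
            simp only [pvB_body]; rw [if_neg h1, if_neg (not_or.mpr ⟨not_not_intro hI, h3⟩)]]
          simp
      · rw [show pvA_entries (s :: rest) hg es = ((hg, es), s :: rest) from by
          simp only [pvA_entries]; rw [if_neg h1, if_pos hI]]
        rw [show pvB_body (s :: rest) = [] from by
          simp only [pvB_body]; rw [if_neg h1, if_pos (Or.inl hI)]]
        simp

-- lines consumed by the options loop are never header lines
theorem pvB_main_options : ∀ (ls : List String) (hg : Bool),
    pvB_main (pvA_options ls hg).2 = pvB_main ls := by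
  intro ls
  induction ls with
  | nil => intro hg; simp [pvA_options]
  | cons s rest ih =>
    intro hg
    by_cases h1 : PySem.Str.strip s = ""
    · rw [show pvA_options (s :: rest) hg = pvA_options rest hg from by
        simp only [pvA_options]; rw [if_pos h1]]
      rw [ih hg]
      rw [show pvB_main (s :: rest) = pvB_main rest from by
        simp only [pvB_main]; rw [if_neg (by rw [h1]; decide)]]
    · by_cases h2 : PySem.Str.startswith (PySem.Str.strip s) ":" = true
      · rw [show pvA_options (s :: rest) hg
            = pvA_options rest (if PySem.Str.isIn ":glob:" (PySem.Str.strip s) then true else hg) from by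
          simp only [pvA_options]; rw [if_neg h1, if_pos h2]]
        rw [ih _]
        rw [show pvB_main (s :: rest) = pvB_main rest from by
          simp only [pvB_main]
          rw [if_neg (by intro h; rw [h] at h2; exact absurd h2 (by decide))]]
      · rw [show pvA_options (s :: rest) hg = (hg, s :: rest) from by
          simp only [pvA_options]; rw [if_neg h1, if_neg h2]]

-- lines consumed by the entries loop are never header lines
theorem pvB_main_entries : ∀ (ls : List String) (hg : Bool) (es : List String),
    pvB_main (pvA_entries ls hg es).2 = pvB_main ls := by
  intro ls
  induction ls with
  | nil => intro hg es; simp [pvA_entries]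
  | cons s rest ih =>
    intro hg es
    by_cases h1 : PySem.Str.strip s = ""
    · rw [show pvA_entries (s :: rest) hg es = pvA_entries rest hg es from by
        simp only [pvA_entries]; rw [if_pos h1]]
      rw [ih hg es]
      rw [show pvB_main (s :: rest) = pvB_main rest from by
        simp only [pvB_main]; rw [if_neg (by rw [h1]; decide)]]
    · by_cases hI : pvIndented s = true
      · by_cases h3 : PySem.Str.startswith (PySem.Str.strip s) ".." = true
        · rw [show pvA_entries (s :: rest) hg es = ((hg, es), s :: rest) from by
            simp only [pvA_entries]; rw [if_neg h1, if_neg (not_not_intro hI), if_pos h3]]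
        · rw [show pvA_entries (s :: rest) hg es
              = pvA_entries rest hg (es ++ [pvDocname (PySem.Str.strip s)]) from by
            simp only [pvA_entries]; rw [if_neg h1, if_neg (not_not_intro hI), if_neg h3]]
          rw [ih hg _]
          rw [show pvB_main (s :: rest) = pvB_main rest from by
            simp only [pvB_main]
            rw [if_neg (by intro h; rw [h] at h3; exact h3 (by decide))]]
      · rw [show pvA_entries (s :: rest) hg es = ((hg, es), s :: rest) from by
          simp only [pvA_entries]; rw [if_neg h1, if_pos hI]]

-- A's outer loop appends exactly B's header-indexed blocks
theorem pvA_main_eq : ∀ (n : Nat) (ls : List String) (blocks : List (Bool × List String)),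
    ls.length ≤ n → pvA_main ls blocks = blocks ++ pvB_main ls := by
  intro n
  induction n with
  | zero =>
    intro ls blocks hlen
    have : ls = [] := List.length_eq_zero_iff.mp (Nat.le_zero.mp hlen)
    subst this; simp [pvA_main, pvB_main]
  | succ m ih =>
    intro ls blocks hlen
    match ls with
    | [] => simp [pvA_main, pvB_main]
    | s :: rest =>
      simp only [List.length_cons] at hlen
      by_cases h : PySem.Str.strip s = ".. toctree::"
      · rw [show pvA_main (s :: rest) blocks
            = pvA_main (pvA_entries (pvA_options rest false).2 (pvA_options rest false).1 []).2
                (blocks ++ [(pvA_entries (pvA_options rest false).2 (pvA_options rest false).1 []).1]) from by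
          rw [pvA_main.eq_2]; simp only [if_neg (not_not_intro h)]]
        have hlen2 : (pvA_entries (pvA_options rest false).2 (pvA_options rest false).1 []).2.length ≤ m := by
          have hx1 := pvA_options_length rest false
          have hx2 := pvA_entries_length (pvA_options rest false).2 (pvA_options rest false).1 []
          omega
        rw [ih _ _ hlen2]
        rw [pvB_main_entries, pvB_main_options]
        have hblk : (pvA_entries (pvA_options rest false).2 (pvA_options rest false).1 []).1
            = pvB_block rest := by
          rw [pvA_entries_fst, pvA_options_eq]
          simp [pvB_block]
        rw [hblk]
        rw [show pvB_main (s :: rest) = pvB_block rest :: pvB_main rest from by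
          simp only [pvB_main]; rw [if_pos h]]
        simp
      · rw [show pvA_main (s :: rest) blocks = pvA_main rest blocks from by
          rw [pvA_main.eq_2]; simp only [if_pos h]]
        rw [ih rest blocks (by omega)]
        rw [show pvB_main (s :: rest) = pvB_main rest from by
          simp only [pvB_main]; rw [if_neg h]]

-- ===== VERDICT (by name: the statement is the Claim_ definition above) =====
theorem parse_toctree_blocks_from_index_spec : Claim_equal_parse_toctree_blocks_from_index := by
  intro content _
  show parse_toctree_blocks_from_index content = parse_toctree_blocks_from_index_alt content
  unfold parse_toctree_blocks_from_index parse_toctree_blocks_from_index_alt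
  exact pvA_main_eq (PySem.Str.splitlines content).length _ [] le_rfl
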